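-- pv_equiv track=rewrite | github.com/nyeinsoe26/continuous_authentication_using_keystroke_dynamics | utility_functions_v2.py | restore_from_flattened_vec_multi_session
-- ===== SOURCE A (Python) =====
-- def restore_from_flattened_vec_multi_session(flattened_vec,length_list):
--     original_vec = []
--     curr_index = 0
--     for i in range(len(length_list)):
--         vec_per_db = []
--         for j in range(len(length_list[i])):
--             upper_bound = curr_index + length_list[i][j]
--             temp =  flattened_vec[curr_index:upper_bound]
--             vec_per_db.append(temp)
--             curr_index = curr_index + length_list[i][j]
--         original_vec.append(vec_per_db)
--     return original_vec
-- ===== SOURCE B (Python) =====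
-- def restore_from_flattened_vec_multi_session(flattened_vec, length_list):
--     # Phase 1: prefix-sum boundary table over the flattened lengths.
--     bounds = [0]
--     for inner in length_list:
--         for l in inner:
--             bounds.append(bounds[-1] + l)
--     # Consecutive boundary pairs are exactly the (start, end) slice offsets.
--     pairs = list(zip(bounds, bounds[1:]))
--     # Phase 2: walk the shape, consuming one chunk of pairs per inner list.
--     out = []
--     for inner in length_list:
--         chunk, pairs = pairs[:len(inner)], pairs[len(inner):]
--         out.append([flattened_vec[s:e] for s, e in chunk])
--     return out
-- ===== Notes on version B (the rewrite author's own statement) =====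
-- stated objective: alternative
-- what changed: Replaces the mutable running index threaded through both loops with a precomputed prefix-sum boundary table zipped into (start,end) pairs that a second shape-walking pass consumes chunk by chunk.
import Mathlib
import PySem

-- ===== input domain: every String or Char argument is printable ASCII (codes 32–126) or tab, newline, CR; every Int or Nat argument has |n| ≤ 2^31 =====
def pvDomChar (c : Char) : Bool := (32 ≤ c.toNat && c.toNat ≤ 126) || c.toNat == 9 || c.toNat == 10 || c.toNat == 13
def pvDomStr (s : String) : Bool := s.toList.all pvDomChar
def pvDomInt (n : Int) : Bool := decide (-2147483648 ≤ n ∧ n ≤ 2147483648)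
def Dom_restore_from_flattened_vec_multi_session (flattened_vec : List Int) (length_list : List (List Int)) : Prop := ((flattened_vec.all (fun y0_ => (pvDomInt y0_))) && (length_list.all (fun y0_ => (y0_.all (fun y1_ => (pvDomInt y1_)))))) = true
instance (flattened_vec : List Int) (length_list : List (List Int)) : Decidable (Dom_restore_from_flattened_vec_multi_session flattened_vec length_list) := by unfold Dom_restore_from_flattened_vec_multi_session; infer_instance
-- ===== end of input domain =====

-- B replaces A's running index threaded through both loops by a precomputed
-- prefix-sum boundary table consumed chunkwise by a second shape-walking pass
-- (objective: alternative decomposition, same cost).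

-- ===== PORT A =====
-- inner loop of A: slices one vec_per_db, threading curr_index
def pvAInner (fv : List Int) (curr : Int) : List Int → (List (List Int) × Int)
  | [] => ([], curr)
  | l :: ls =>
    let upper := curr + l
    let temp := PySem.List.slice fv curr upper
    let (rest, c) := pvAInner fv (curr + l) ls
    (temp :: rest, c)

-- outer loop of A
def pvAOuter (fv : List Int) (curr : Int) : List (List Int) → List (List (List Int))
  | [] => []
  | inner :: rest =>
    let (v, c) := pvAInner fv curr inner
    v :: pvAOuter fv c rest

def restore_from_flattened_vec_multi_session (flattened_vec : List Int) (length_list : List (List Int)) : List (List (List Int)) :=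
  pvAOuter flattened_vec 0 length_list

-- ===== PORT B =====
-- B phase 1: bounds = [0]; for each length append bounds[-1] + l
def pvBounds (acc : Int) : List Int → List Int
  | [] => [acc]
  | l :: ls => acc :: pvBounds (acc + l) ls

-- B phase 2: consume one chunk of (start,end) pairs per inner list
def pvBOuter (fv : List Int) : List (Int × Int) → List (List Int) → List (List (List Int))
  | _, [] => []
  | pairs, inner :: rest =>
    let chunk := pairs.take inner.length
    let pairs' := pairs.drop inner.length
    (chunk.map fun p => PySem.List.slice fv p.1 p.2) :: pvBOuter fv pairs' rest

def restore_from_flattened_vec_multi_session_alt (flattened_vec : List Int) (length_list : List (List Int)) : List (List (List Int)) :=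
  let bounds := pvBounds 0 length_list.flatten
  let pairs := bounds.zip bounds.tail
  pvBOuter flattened_vec pairs length_list

-- ===== PRECONDITION & SPEC =====
def Spec_restore_from_flattened_vec_multi_session (flattened_vec : List Int) (length_list : List (List Int)) (out : List (List (List Int))) : Prop := out = restore_from_flattened_vec_multi_session_alt flattened_vec length_list
instance (flattened_vec : List Int) (length_list : List (List Int)) (out : List (List (List Int))) : Decidable (Spec_restore_from_flattened_vec_multi_session flattened_vec length_list out) := by unfold Spec_restore_from_flattened_vec_multi_session; infer_instance

-- ===== CLAIM (what is proved, stated in full; the proofs are below) =====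
def Claim_equal_restore_from_flattened_vec_multi_session : Prop := ∀ (flattened_vec : List Int) (length_list : List (List Int)), Dom_restore_from_flattened_vec_multi_session flattened_vec length_list → Spec_restore_from_flattened_vec_multi_session flattened_vec length_list (restore_from_flattened_vec_multi_session flattened_vec length_list)

-- ===== LEMMAS AND PROOFS =====

-- the (start,end) pair list generated from offset acc by lengths ls
def pvPairsOf (acc : Int) : List Int → List (Int × Int)
  | [] => []
  | l :: ls => (acc, acc + l) :: pvPairsOf (acc + l) ls

theorem pvBounds_shape (ls : List Int) (acc : Int) :
    ∃ t, pvBounds acc ls = acc :: t := by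
  cases ls <;> exact ⟨_, rfl⟩

theorem zip_pvBounds (ls : List Int) : ∀ acc : Int,
    (pvBounds acc ls).zip (pvBounds acc ls).tail = pvPairsOf acc ls := by
  induction ls with
  | nil => intro acc; rfl
  | cons l ls ih =>
    intro acc
    obtain ⟨t, ht⟩ := pvBounds_shape ls (acc + l)
    have h2 := ih (acc + l)
    rw [ht] at h2
    simp only [List.tail_cons] at h2
    simp only [pvBounds, ht, List.zip_cons_cons, List.tail_cons, pvPairsOf]
    rw [h2]

theorem pvPairsOf_length (ls : List Int) : ∀ acc : Int,
    (pvPairsOf acc ls).length = ls.length := by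
  induction ls with
  | nil => intro acc; rfl
  | cons l ls ih => intro acc; simp [pvPairsOf, ih]

theorem pvPairsOf_append (xs ys : List Int) : ∀ acc : Int,
    pvPairsOf acc (xs ++ ys) = pvPairsOf acc xs ++ pvPairsOf (acc + xs.sum) ys := by
  induction xs with
  | nil => intro acc; simp [pvPairsOf]
  | cons x xs ih =>
    intro acc
    simp [pvPairsOf, ih (acc + x), add_assoc]

theorem pvAInner_eq (fv : List Int) (ls : List Int) : ∀ acc : Int,
    pvAInner fv acc ls =
      ((pvPairsOf acc ls).map (fun p => PySem.List.slice fv p.1 p.2), acc + ls.sum) := by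
  induction ls with
  | nil => intro acc; simp [pvAInner, pvPairsOf]
  | cons l ls ih =>
    intro acc
    simp [pvAInner, pvPairsOf, ih (acc + l), add_assoc]

theorem pvAOuter_eq (fv : List Int) (ll : List (List Int)) : ∀ acc : Int,
    pvAOuter fv acc ll = pvBOuter fv (pvPairsOf acc ll.flatten) ll := by
  induction ll with
  | nil => intro acc; rfl
  | cons inner rest ih =>
    intro acc
    have hflat : (inner :: rest).flatten = inner ++ rest.flatten := by simp
    rw [pvAOuter, hflat, pvPairsOf_append]
    have hlen : (pvPairsOf acc inner).length = inner.length := pvPairsOf_length inner acc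
    have htake : (pvPairsOf acc inner ++ pvPairsOf (acc + inner.sum) rest.flatten).take inner.length = pvPairsOf acc inner := by
      rw [← hlen, List.take_left]
    have hdrop : (pvPairsOf acc inner ++ pvPairsOf (acc + inner.sum) rest.flatten).drop inner.length = pvPairsOf (acc + inner.sum) rest.flatten := by
      rw [← hlen, List.drop_left]
    rw [pvBOuter]
    simp only [htake, hdrop]
    rw [pvAInner_eq fv inner acc]
    simp [ih (acc + inner.sum)]

-- ===== VERDICT (by name: the statement is the Claim_ definition above) =====
theorem restore_from_flattened_vec_multi_session_spec : Claim_equal_restore_from_flattened_vec_multi_session := by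
  intro fv ll _
  show restore_from_flattened_vec_multi_session fv ll = _
  rw [restore_from_flattened_vec_multi_session, restore_from_flattened_vec_multi_session_alt]
  rw [zip_pvBounds, pvAOuter_eq]
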